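-- pv_equiv track=rewrite | github.com/hoeen/coding_test_training | solution_codes/programmers_구현_스타 수열_1회답.py | solution
-- ===== SOURCE A (Python) =====
-- from collections import Counter
--
-- def solution(a):
--     max_len = 0
--     c = Counter(a)
--     for key in c.keys():
--         value = c[key]
--         if value > max_len:
--             # 뒤의 두개 탐색하며 진행
--             count = 0
--             idx = 0
--             while idx < len(a)-1:
--                 # 현재칸, 뒷칸 모두 아닌 경우 및 현재칸, 뒷칸이 같은 경우는 카운트 불가
--                 if (a[idx] != key and a[idx+1] != key) or (a[idx] == a[idx+1]):
--                     idx += 1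
--                 else:
--                     count += 1
--                     idx += 2
--
--             max_len = max(max_len, count)
--
--     return max_len*2
-- ===== SOURCE B (Python) =====
-- def solution(a):
--     # One pass over adjacent pairs, updating every value's greedy (count, next-free-index)
--     # state in a dict, instead of rescanning the whole array per distinct value.
--     n = len(a)
--     state = {}  # key -> (cnt, free)
--     for i in range(n - 1):
--         x, y = a[i], a[i + 1]
--         if x == y:
--             continue
--         for k in (x, y):
--             cnt, free = state.get(k, (0, 0))
--             if i >= free:
--                 state[k] = (cnt + 1, i + 2)
--     best = 0
--     for k in state:
--         best = max(best, state[k][0])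
--     return best * 2
-- ===== Notes on version B (the rewrite author's own statement) =====
-- stated objective: faster
-- what changed: A rescans the whole array once per distinct value (greedy pair scan per Counter key); B makes a single pass over adjacent pairs, maintaining each value's greedy (count, next-free-index) state in one dict, then takes the max count.
import Mathlib
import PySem

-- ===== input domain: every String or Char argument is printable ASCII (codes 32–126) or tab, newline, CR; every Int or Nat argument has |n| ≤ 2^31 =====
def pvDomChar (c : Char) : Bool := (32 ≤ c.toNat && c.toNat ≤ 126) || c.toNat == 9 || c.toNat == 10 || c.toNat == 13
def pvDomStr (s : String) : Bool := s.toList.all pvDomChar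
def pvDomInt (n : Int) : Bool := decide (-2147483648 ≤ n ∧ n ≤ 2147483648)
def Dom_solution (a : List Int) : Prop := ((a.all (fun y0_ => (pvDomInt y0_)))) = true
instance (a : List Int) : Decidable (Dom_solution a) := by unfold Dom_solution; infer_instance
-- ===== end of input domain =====

-- B replaces A's per-distinct-value rescans of the whole array by ONE pass over the
-- adjacent pairs that updates every value's greedy (count, next-free-index) state in a
-- dict; objective: a different, worst-case asymptotically better algorithm.

-- ===== PORT A =====
-- the inner 'while idx < len(a)-1' loop of A, with its count accumulator
def aScan (a : List Int) (key : Int) (count : Int) (idx : Nat) : Int :=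
  if _h : idx + 1 < a.length then
    if (a.getD idx 0 ≠ key ∧ a.getD (idx+1) 0 ≠ key) ∨ a.getD idx 0 = a.getD (idx+1) 0 then
      aScan a key count (idx+1)
    else
      aScan a key (count+1) (idx+2)
  else count
termination_by a.length - idx

def solution (a : List Int) : Int :=
  let c := PySem.Dict.counter a
  let maxLen := c.keys.foldl (fun m key =>
    let value := c.getD key 0
    if value > m then max m (aScan a key 0 0) else m) 0
  maxLen * 2

-- ===== PORT B =====
-- one 'for k in (x, y)' body: update key k's greedy state at pair index i
def bUpd (st : PySem.Dict Int (Int × Int)) (k : Int) (i : Nat) : PySem.Dict Int (Int × Int) :=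
  if (i : Int) ≥ (st.getD k (0, 0)).2 then
    st.insert k ((st.getD k (0, 0)).1 + 1, (i : Int) + 2)
  else st

-- the single pass over pair indices i = 0 .. n-2
def bState (a : List Int) : PySem.Dict Int (Int × Int) :=
  (List.range (a.length - 1)).foldl (fun st i =>
    let x := a.getD i 0
    let y := a.getD (i+1) 0
    if x = y then st else bUpd (bUpd st x i) y i) PySem.Dict.empty

def solution_alt (a : List Int) : Int :=
  let st := bState a
  let best := st.keys.foldl (fun b k => max b (st.getD k (0, 0)).1) 0
  best * 2

-- ===== PRECONDITION & SPEC =====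
def Spec_solution (a : List Int) (out : Int) : Prop := out = solution_alt a
instance (a : List Int) (out : Int) : Decidable (Spec_solution a out) := by unfold Spec_solution; infer_instance

-- ===== CLAIM (what is proved, stated in full; the proofs are below) =====
def Claim_equal_solution : Prop := ∀ (a : List Int), Dom_solution a → Spec_solution a (solution a)

-- ===== LEMMAS AND PROOFS =====

-- the per-key abstraction of B's dict step
def pstep (a : List Int) (k : Int) (s : Int × Int) (i : Nat) : Int × Int :=
  let x := a.getD i 0
  let y := a.getD (i+1) 0
  if x = y then s
  else if (k = x ∨ k = y) ∧ (i : Int) ≥ s.2 then (s.1 + 1, (i : Int) + 2) else s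

lemma getD_bUpd_self (st : PySem.Dict Int (Int × Int)) (k : Int) (i : Nat) :
    (bUpd st k i).getD k (0, 0) =
      (if (i : Int) ≥ (st.getD k (0, 0)).2
        then ((st.getD k (0, 0)).1 + 1, (i : Int) + 2) else st.getD k (0, 0)) := by
  unfold bUpd
  split_ifs with h
  · rw [PySem.Dict.getD_insert_self]
  · rfl

lemma getD_bUpd_of_ne (st : PySem.Dict Int (Int × Int)) (k k' : Int) (i : Nat) (h : k' ≠ k) :
    (bUpd st k i).getD k' (0, 0) = st.getD k' (0, 0) := by
  unfold bUpd
  split_ifs with h2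
  · exact PySem.Dict.getD_insert_of_ne _ _ _ h
  · rfl

lemma getD_foldl_bState (a : List Int) (k : Int) :
    ∀ (l : List Nat) (st : PySem.Dict Int (Int × Int)),
      ((l.foldl (fun st i =>
          let x := a.getD i 0
          let y := a.getD (i+1) 0
          if x = y then st else bUpd (bUpd st x i) y i) st).getD k (0, 0))
        = l.foldl (pstep a k) (st.getD k (0, 0)) := by
  intro l
  induction l with
  | nil => intro st; rfl
  | cons i t ih =>
    intro st
    simp only [List.foldl_cons]
    rw [ih]
    congr 1
    unfold pstep
    simp only
    set x := a.getD i 0 with hx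
    set y := a.getD (i+1) 0 with hy
    by_cases hxy : x = y
    · simp [hxy]
    · simp only [if_neg hxy]
      by_cases hkx : k = x
      · -- k = x ≠ y : outer bUpd at y leaves k's entry alone
        subst hkx
        rw [getD_bUpd_of_ne _ _ _ _ hxy, getD_bUpd_self]
        simp [hxy]
      · by_cases hky : k = y
        · subst hky
          rw [getD_bUpd_self, getD_bUpd_of_ne _ _ _ _ hkx]
          simp [hkx]
        · rw [getD_bUpd_of_ne _ _ _ _ hky, getD_bUpd_of_ne _ _ _ _ hkx]
          simp [hkx, hky]

lemma aScan_acc (a : List Int) (k : Int) :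
    ∀ (m i : Nat) (c : Int), a.length - i ≤ m → aScan a k c i = c + aScan a k 0 i := by
  intro m
  induction m with
  | zero =>
    intro i c h
    have hn : ¬ (i + 1 < a.length) := by omega
    have h1 : ∀ c' : Int, aScan a k c' i = c' := by
      intro c'; rw [aScan]; simp [hn]
    rw [h1, h1]; try omega
  | succ m ih =>
    intro i c h
    by_cases hlt : i + 1 < a.length
    · have hz : ∀ c' : Int, aScan a k c' i =
          if (a.getD i 0 ≠ k ∧ a.getD (i+1) 0 ≠ k) ∨ a.getD i 0 = a.getD (i+1) 0
          then aScan a k c' (i+1) else aScan a k (c'+1) (i+2) := by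
        intro c'; rw [aScan]; simp only [dif_pos hlt]
      rw [hz, hz]
      split_ifs with hc
      · rw [ih (i+1) c (by omega), ih (i+1) 0 (by omega)]; try omega
      · rw [ih (i+2) (c+1) (by omega), ih (i+2) (0+1) (by omega)]; try omega
    · have h1 : ∀ c' : Int, aScan a k c' i = c' := by
        intro c'; rw [aScan]; simp [hlt]
      rw [h1, h1]; try omega

-- A's greedy count for a key is bounded by that key's multiplicity
lemma aScan_le_count (a : List Int) (k : Int) :
    ∀ (m i : Nat) (c : Int), a.length - i ≤ m →
      aScan a k c i ≤ c + ((a.drop i).count k : Int) := by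
  intro m
  induction m with
  | zero =>
    intro i c h
    rw [aScan]
    have : ¬ (i + 1 < a.length) := by omega
    simp [this]
    try positivity
  | succ m ih =>
    intro i c h
    rw [aScan]
    by_cases hlt : i + 1 < a.length
    · simp only [dif_pos hlt]
      have hi : i < a.length := by omega
      have hd1 : a.drop i = a[i] :: a.drop (i+1) := List.drop_eq_getElem_cons hi
      have hd2 : a.drop (i+1) = a[i+1] :: a.drop (i+2) := List.drop_eq_getElem_cons hlt
      have hgx : a.getD i 0 = a[i] := List.getD_eq_getElem a 0 hi
      have hgy : a.getD (i+1) 0 = a[i+1] := List.getD_eq_getElem a 0 hlt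
      split_ifs with hc
      · calc aScan a k c (i+1) ≤ c + ((a.drop (i+1)).count k : Int) := ih (i+1) c (by omega)
          _ ≤ c + ((a.drop i).count k : Int) := by
              rw [hd1, List.count_cons]
              push_cast
              omega
      · have hor : a[i] = k ∨ a[i+1] = k := by
          rw [hgx, hgy] at hc
          by_contra hno
          push_neg at hno
          exact hc (Or.inl ⟨hno.1, hno.2⟩)
        have hone : (1 : Int) + ((a.drop (i+2)).count k : Int) ≤ ((a.drop i).count k : Int) := by
          rw [hd1, hd2, List.count_cons, List.count_cons]
          rcases hor with h1 | h1 <;> simp [h1] <;> push_cast <;> omega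
        calc aScan a k (c+1) (i+2) ≤ (c+1) + ((a.drop (i+2)).count k : Int) := ih (i+2) (c+1) (by omega)
          _ ≤ c + ((a.drop i).count k : Int) := by omega
    · simp [hlt]
      try positivity

-- the per-key fold over the remaining pair indices computes A's scan
lemma pstep_fold_eq_aScan (a : List Int) (k : Int) :
    ∀ (m j f : Nat) (c : Int), j + m = a.length - 1 →
      ((List.range' j m).foldl (pstep a k) (c, ((f : Nat) : Int))).1
        = c + aScan a k 0 (max j f) := by
  intro m
  induction m with
  | zero =>
    intro j f c h
    simp only [List.range', List.foldl_nil]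
    rw [aScan]
    have : ¬ (max j f + 1 < a.length) := by omega
    simp [this]
  | succ m ih =>
    intro j f c h
    have hj1 : j + 1 < a.length := by omega
    rw [List.range'_succ, List.foldl_cons]
    by_cases hxy : a.getD j 0 = a.getD (j+1) 0
    · -- invalid pair (equal neighbours): both sides skip
      have hps : pstep a k (c, ((f : Nat) : Int)) j = (c, ((f : Nat) : Int)) := by
        simp only [pstep]
        rw [if_pos hxy]
      rw [hps, ih (j+1) f c (by omega)]
      congr 1
      by_cases hf : j + 1 ≤ f
      · congr 1; omega
      · have h1 : max j f = j := by omega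
        have h2 : max (j+1) f = j + 1 := by omega
        have hstep : aScan a k 0 j = aScan a k 0 (j+1) := by
          rw [aScan]
          simp only [dif_pos hj1]
          rw [if_pos (Or.inr hxy)]
        rw [h1, h2, hstep]
    · by_cases hcond : (k = a.getD j 0 ∨ k = a.getD (j+1) 0) ∧
          (j : Int) ≥ (((c, ((f : Nat) : Int)) : Int × Int)).2
      · -- pick: pair j consumed, free moves to j+2
        have hps : pstep a k (c, ((f : Nat) : Int)) j = (c + 1, (((j + 2 : Nat)) : Int)) := by
          simp only [pstep]
          rw [if_neg hxy, if_pos hcond]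
          show ((c + 1, (j : Int) + 2) : Int × Int) = _
          congr 1 <;> omega
        rw [hps, ih (j+1) (j+2) (c+1) (by omega)]
        have hfj : f ≤ j := by
          have h' : ((f : Nat) : Int) ≤ (j : Int) := hcond.2
          exact_mod_cast h'
        have h1 : max j f = j := by omega
        have h2 : max (j+1) (j+2) = j + 2 := by omega
        have hstep : aScan a k 0 j = aScan a k (0+1) (j+2) := by
          rw [aScan]
          simp only [dif_pos hj1]
          rw [if_neg (by
            push_neg
            refine ⟨?_, hxy⟩
            intro hxk
            rcases hcond.1 with hk | hk
            · exact absurd hk.symm hxk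
            · exact hk.symm)]
        rw [h1, h2, hstep, aScan_acc a k a.length (j+2) (0+1) (by omega)]
        omega
      · -- no pick for key k at pair j
        have hps : pstep a k (c, ((f : Nat) : Int)) j = (c, ((f : Nat) : Int)) := by
          simp only [pstep]
          rw [if_neg hxy, if_neg hcond]
        rw [hps, ih (j+1) f c (by omega)]
        congr 1
        by_cases hf : j + 1 ≤ f
        · congr 1; omega
        · have hfj : f ≤ j := by omega
          have hk : ¬ (k = a.getD j 0 ∨ k = a.getD (j+1) 0) := by
            intro hor
            refine hcond ⟨hor, ?_⟩
            show (j : Int) ≥ ((f : Nat) : Int)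
            exact_mod_cast hfj
          push_neg at hk
          have h1 : max j f = j := by omega
          have h2 : max (j+1) f = j + 1 := by omega
          have hstep : aScan a k 0 j = aScan a k 0 (j+1) := by
            rw [aScan]
            simp only [dif_pos hj1]
            rw [if_pos (Or.inl ⟨fun h => hk.1 h.symm, fun h => hk.2 h.symm⟩)]
          rw [h1, h2, hstep]

-- B's final per-key state component is exactly A's greedy count
lemma state_getD_eq_aScan (a : List Int) (k : Int) :
    ((bState a).getD k (0, 0)).1 = aScan a k 0 0 := by
  unfold bState
  rw [getD_foldl_bState]
  have h0 : (PySem.Dict.empty : PySem.Dict Int (Int × Int)).getD k (0, 0) = (0, 0) := by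
    simp [pysem]
  rw [h0]
  have : List.range (a.length - 1) = List.range' 0 (a.length - 1) := by
    rw [List.range_eq_range']
  rw [this]
  have := pstep_fold_eq_aScan a k (a.length - 1) 0 0 0 (by omega)
  simpa using this

lemma mem_keys_bUpd (st : PySem.Dict Int (Int × Int)) (k x : Int) (i : Nat)
    (h : k ∈ (bUpd st x i).keys) : k = x ∨ k ∈ st.keys := by
  unfold bUpd at h
  split_ifs at h with h2
  · rcases (PySem.Dict.mem_keys_insert _ _ _ _).1 h with h3 | h3
    · exact Or.inl h3
    · exact Or.inr h3
  · exact Or.inr h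

-- every key of B's state dict occurs in a
lemma mem_a_of_mem_keys_bState (a : List Int) (k : Int)
    (h : k ∈ (bState a).keys) : k ∈ a := by
  unfold bState at h
  have main : ∀ (l : List Nat) (st : PySem.Dict Int (Int × Int)),
      (∀ j ∈ l, j + 1 < a.length) →
      k ∈ ((l.foldl (fun st i =>
          let x := a.getD i 0
          let y := a.getD (i+1) 0
          if x = y then st else bUpd (bUpd st x i) y i) st).keys) →
      k ∈ st.keys ∨ k ∈ a := by
    intro l
    induction l with
    | nil => intro st _ hk; exact Or.inl hk
    | cons i t ih =>
      intro st hbound hk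
      simp only [List.foldl_cons] at hk
      have hi : i + 1 < a.length := hbound i (by simp)
      have hgx : a.getD i 0 ∈ a := by
        rw [List.getD_eq_getElem a 0 (show i < a.length by omega)]
        exact List.getElem_mem _
      have hgy : a.getD (i+1) 0 ∈ a := by
        rw [List.getD_eq_getElem a 0 hi]
        exact List.getElem_mem _
      rcases ih _ (fun j hj => hbound j (by simp [hj])) hk with h1 | h1
      · split_ifs at h1 with hxy
        · exact Or.inl h1
        · rcases mem_keys_bUpd _ _ _ _ h1 with h2 | h2
          · exact Or.inr (h2 ▸ hgy)
          · rcases mem_keys_bUpd _ _ _ _ h2 with h3 | h3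
            · exact Or.inr (h3 ▸ hgx)
            · exact Or.inl h3
      · exact Or.inr h1
  rcases main (List.range (a.length - 1)) PySem.Dict.empty
      (fun j hj => by rw [List.mem_range] at hj; omega) h with h1 | h1
  · rw [PySem.Dict.keys_empty] at h1
    cases h1
  · exact h1

-- a key absent from B's state has greedy count 0
lemma aScan_eq_zero_of_not_mem (a : List Int) (k : Int)
    (h : k ∉ (bState a).keys) : aScan a k 0 0 = 0 := by
  rw [← state_getD_eq_aScan a k]
  have hc : (bState a).contains k = false := by
    by_contra hcon
    have : (bState a).contains k = true := by
      cases hcc : (bState a).contains k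
      · exact absurd hcc hcon
      · rfl
    exact h ((PySem.Dict.contains_iff_mem_keys _ _).1 this)
  rw [PySem.Dict.getD_of_not_contains _ _ hc]

-- a running max of a projection is below any bound dominating base and entries
lemma foldl_max_le (l : List Int) (f : Int → Int) (b init : Int)
    (h0 : init ≤ b) (h : ∀ k ∈ l, f k ≤ b) :
    l.foldl (fun m k => max m (f k)) init ≤ b := by
  induction l generalizing init with
  | nil => exact h0
  | cons x t ih =>
    simp only [List.foldl_cons]
    exact ih (max init (f x)) (max_le h0 (h x (by simp)))
      (fun k hk => h k (List.mem_cons_of_mem _ hk))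

-- dropping A's 'value > max_len' prune does not change the running max
lemma prune_fold_eq (a : List Int) (S : Int → Int)
    (hle : ∀ k, S k ≤ (a.count k : Int)) :
    ∀ (l : List Int) (m : Int), 0 ≤ m →
      l.foldl (fun m key => if (a.count key : Int) > m then max m (S key) else m) m
        = l.foldl (fun m key => max m (S key)) m := by
  intro l
  induction l with
  | nil => intro m _; rfl
  | cons x t ih =>
    intro m hm
    simp only [List.foldl_cons]
    by_cases hgt : (a.count x : Int) > m
    · rw [if_pos hgt]
      exact ih (max m (S x)) (le_trans hm (le_max_left _ _))
    · rw [if_neg hgt]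
      have hmx : max m (S x) = m := max_eq_left (le_trans (hle x) (by omega))
      rw [hmx]
      exact ih m hm

theorem solution_eq (a : List Int) : solution a = solution_alt a := by
  show ((PySem.Dict.counter a).keys.foldl (fun m key =>
          if (PySem.Dict.counter a).getD key 0 > m then max m (aScan a key 0 0) else m) 0) * 2
      = ((bState a).keys.foldl (fun b k => max b ((bState a).getD k (0, 0)).1) 0) * 2
  have hle : ∀ k, aScan a k 0 0 ≤ (a.count k : Int) := by
    intro k
    have := aScan_le_count a k a.length 0 0 (by omega)
    simpa using this
  -- A's fold: counter lookups, then drop the prune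
  have hA : (PySem.Dict.counter a).keys.foldl (fun m key =>
        if (PySem.Dict.counter a).getD key 0 > m then max m (aScan a key 0 0) else m) 0
      = (PySem.Dict.counter a).keys.foldl (fun m key => max m (aScan a key 0 0)) 0 := by
    rw [PySem.List.foldl_congr_mem _ _
      (fun m key => if (a.count key : Int) > m then max m (aScan a key 0 0) else m) _
      (by intro acc x hx; rw [PySem.Dict.getD_counter])]
    exact prune_fold_eq a _ hle _ 0 le_rfl
  -- B's fold entries are A's per-key scans
  have hB : (bState a).keys.foldl (fun b k => max b ((bState a).getD k (0, 0)).1) 0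
      = (bState a).keys.foldl (fun b k => max b (aScan a k 0 0)) 0 :=
    PySem.List.foldl_congr_mem _ _ _ _ (by intro acc x hx; rw [state_getD_eq_aScan])
  -- the two running maxes agree
  have hmax : (PySem.Dict.counter a).keys.foldl (fun m key => max m (aScan a key 0 0)) 0
      = (bState a).keys.foldl (fun b k => max b (aScan a k 0 0)) 0 := by
    have hAinfo := PySem.List.le_foldl_max_int ((PySem.Dict.counter a).keys)
      (fun k => aScan a k 0 0) 0
    have hBinfo := PySem.List.le_foldl_max_int ((bState a).keys)
      (fun k => aScan a k 0 0) 0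
    apply le_antisymm
    · apply foldl_max_le _ _ _ _ hBinfo.1
      intro k hk
      by_cases hmem : k ∈ (bState a).keys
      · exact hBinfo.2 k hmem
      · calc aScan a k 0 0 = 0 := aScan_eq_zero_of_not_mem a k hmem
          _ ≤ _ := hBinfo.1
    · apply foldl_max_le _ _ _ _ hAinfo.1
      intro k hk
      have hka : k ∈ a := mem_a_of_mem_keys_bState a k hk
      have hmem : k ∈ (PySem.Dict.counter a).keys := by
        rw [PySem.Dict.keys_counter]
        exact (PySem.Set.mem_ofList _ _).2 hka
      exact hAinfo.2 k hmem
  rw [hA, hmax, ← hB]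

-- ===== VERDICT (by name: the statement is the Claim_ definition above) =====
theorem solution_spec : Claim_equal_solution := by
  intro a _
  unfold Spec_solution
  exact solution_eq a
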